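-- pv_equiv track=rewrite | github.com/Karns11/Genshin_videogame_project | Project6.py | get_characters_by_criterion
-- ===== SOURCE A (Python) =====
-- ELEMENT = 1
--
-- WEAPON = 2
--
-- RARITY = 3
--
-- REGION = 4
--
-- def get_characters_by_criterion (list_of_tuples, criteria, value):
--     '''function to get characters by a certain criteria
--     list_of_tuples: master list returned by read_file
--     criteria: what character attribute to filter on
--     value: specific value to filter on
--     returns: characters that match the given criteria'''
--     criteria_int = int(criteria)
--     new_list = []
--     #empty_list
--     for a_tuple in list_of_tuples:
--         if list_of_tuples == []: #if given list is empty, return empty list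
--             return new_list
--         if criteria_int == ELEMENT: #element
--             value_str = str(value) #convert value to string
--             value_str_low = value_str.lower() #make value lowercase
--             if a_tuple[1] != None: #disregard the Value of None
--                 if a_tuple[1].lower() == value_str_low:
--                     new_list.append(a_tuple) #append to empty list
--         if criteria_int == WEAPON: #weapon
--             value_str = str(value) #convert value to string
--             value_str_low = value_str.lower() #make value lowercase
--             if a_tuple[2] != None: #disregard None value
--                 if a_tuple[2].lower() == value_str_low:
--                     new_list.append(a_tuple) #append to empty list
--         if criteria_int == RARITY: #rarity
--             value_int = int(value) #convert value to int if == rarity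
--             if a_tuple[3] != None: #disregard None value
--                 if a_tuple[3] == value_int:
--                     new_list.append(a_tuple) #append to empty list
--         if criteria_int == REGION: #region
--             value_str = str(value) #make value a string
--             value_str_low = value_str.lower() #make value lowercase
--             if a_tuple[4] != None: #disregard None value
--                 if a_tuple[4].lower() == value_str_low:
--                     new_list.append(a_tuple) #append to empty list
--     return new_list
-- ===== SOURCE B (Python) =====
-- ELEMENT = 1
--
-- WEAPON = 2
--
-- RARITY = 3
--
-- REGION = 4
--
-- def _group(pairs):
--     """group (key, row) pairs into an insertion-ordered index: key -> list of rows"""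
--     index = {}
--     for k, t in pairs:
--         index[k] = index.get(k, []) + [t]
--     return index
--
-- def get_characters_by_criterion(list_of_tuples, criteria, value):
--     criteria_int = int(criteria)
--     if criteria_int not in (ELEMENT, WEAPON, RARITY, REGION) or not list_of_tuples:
--         return []
--     if criteria_int == RARITY:
--         pairs = [(t[3], t) for t in list_of_tuples if t[3] is not None]
--         return _group(pairs).get(int(value), [])
--     pairs = [(t[criteria_int].lower(), t) for t in list_of_tuples
--              if t[criteria_int] is not None]
--     return _group(pairs).get(str(value).lower(), [])
-- ===== Notes on version B (the rewrite author's own statement) =====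
-- stated objective: alternative
-- what changed: Instead of A's per-element if-chain filter loop, B stages (key,row) pairs from the relevant column, groups them into a dict index mapping each key to its bucket of rows, and answers with a single dictionary lookup.
import Mathlib
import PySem

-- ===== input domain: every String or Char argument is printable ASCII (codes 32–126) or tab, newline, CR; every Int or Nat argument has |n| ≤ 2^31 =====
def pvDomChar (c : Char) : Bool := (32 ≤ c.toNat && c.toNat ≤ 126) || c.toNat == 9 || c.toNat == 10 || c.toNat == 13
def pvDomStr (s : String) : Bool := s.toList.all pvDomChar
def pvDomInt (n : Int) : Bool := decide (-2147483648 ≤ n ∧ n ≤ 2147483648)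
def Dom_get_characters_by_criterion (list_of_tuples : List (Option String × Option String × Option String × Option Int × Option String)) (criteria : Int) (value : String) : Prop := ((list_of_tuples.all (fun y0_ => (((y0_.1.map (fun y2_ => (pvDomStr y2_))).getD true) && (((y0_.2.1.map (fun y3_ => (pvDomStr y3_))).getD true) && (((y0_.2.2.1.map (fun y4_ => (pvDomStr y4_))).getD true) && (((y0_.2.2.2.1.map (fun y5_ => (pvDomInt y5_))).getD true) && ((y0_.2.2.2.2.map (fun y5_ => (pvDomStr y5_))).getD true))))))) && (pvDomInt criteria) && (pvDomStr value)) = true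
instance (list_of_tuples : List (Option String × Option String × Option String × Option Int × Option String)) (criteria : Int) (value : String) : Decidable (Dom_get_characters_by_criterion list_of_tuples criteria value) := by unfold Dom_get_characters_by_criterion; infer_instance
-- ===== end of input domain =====

-- B replaces A's per-element if-chain filter loop by staging (key,row) pairs from the
-- relevant column, grouping them into a dict index (key -> bucket of rows), and answering
-- with one dictionary lookup (objective: alternative — a different data structure).

-- ===== PORT A =====
-- literal transliteration of A's loop: accumulator, four independent `if criteria_int == …` blocks
-- in order; int(value) in the rarity branch is PySem.Int.ofStr? (none = ValueError, excluded by Pre_).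
def get_characters_by_criterion (list_of_tuples : List (Option String × Option String × Option String × Option Int × Option String)) (criteria : Int) (value : String) : List (Option String × Option String × Option String × Option Int × Option String) :=
  let criteria_int := criteria
  list_of_tuples.foldl (fun new_list a_tuple =>
    let new_list :=
      if criteria_int = 1 then
        match a_tuple.2.1 with
        | some s => if PySem.Str.lower s = PySem.Str.lower value then new_list ++ [a_tuple] else new_list
        | none => new_list
      else new_list
    let new_list :=
      if criteria_int = 2 then
        match a_tuple.2.2.1 with
        | some s => if PySem.Str.lower s = PySem.Str.lower value then new_list ++ [a_tuple] else new_list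
        | none => new_list
      else new_list
    let new_list :=
      if criteria_int = 3 then
        match PySem.Int.ofStr? value with   -- raise site in Python; Pre_ excludes none on a nonempty list
        | some value_int =>
          match a_tuple.2.2.2.1 with
          | some r => if r = value_int then new_list ++ [a_tuple] else new_list
          | none => new_list
        | none => new_list
      else new_list
    let new_list :=
      if criteria_int = 4 then
        match a_tuple.2.2.2.2 with
        | some s => if PySem.Str.lower s = PySem.Str.lower value then new_list ++ [a_tuple] else new_list
        | none => new_list
      else new_list
    new_list) []

-- ===== PORT B =====
-- B-side helper: _group — fold the (key, row) pairs into the index dict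
-- (index[k] = index.get(k, []) + [t] is exactly Dict.modify k [] (· ++ [t])).
def pvGroup {K : Type} [BEq K] (pairs : List (K × (Option String × Option String × Option String × Option Int × Option String))) : PySem.Dict K (List (Option String × Option String × Option String × Option Int × Option String)) :=
  pairs.foldl (fun index p => index.modify p.1 [] (· ++ [p.2])) PySem.Dict.empty

-- B-side helper: t[criteria_int] for the string columns 1 / 2 / 4.
def pvColumn (idx : Int) (t : Option String × Option String × Option String × Option Int × Option String) : Option String :=
  if idx = 1 then t.2.1 else if idx = 2 then t.2.2.1 else t.2.2.2.2

def get_characters_by_criterion_alt (list_of_tuples : List (Option String × Option String × Option String × Option Int × Option String)) (criteria : Int) (value : String) : List (Option String × Option String × Option String × Option Int × Option String) :=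
  if ¬ (criteria = 1 ∨ criteria = 2 ∨ criteria = 3 ∨ criteria = 4) ∨ list_of_tuples = [] then []
  else if criteria = 3 then
    let pairs := list_of_tuples.filterMap (fun t => t.2.2.2.1.map (fun k => (k, t)))
    match PySem.Int.ofStr? value with   -- int(value): raise site in Python, excluded by Pre_
    | some v => (pvGroup pairs).getD v []
    | none => []
  else
    let pairs := list_of_tuples.filterMap (fun t => (pvColumn criteria t).map (fun s => (PySem.Str.lower s, t)))
    (pvGroup pairs).getD (PySem.Str.lower value) []

-- ===== PRECONDITION & SPEC =====
-- Pre_ excludes exactly the inputs where Python A raises ValueError: rarity filtering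
-- (criteria = 3) over a nonempty list with a value string int() cannot parse.
def Pre_get_characters_by_criterion (list_of_tuples : List (Option String × Option String × Option String × Option Int × Option String)) (criteria : Int) (value : String) : Prop :=
  ¬ (criteria = 3 ∧ list_of_tuples ≠ [] ∧ PySem.Int.ofStr? value = none)
instance (list_of_tuples : List (Option String × Option String × Option String × Option Int × Option String)) (criteria : Int) (value : String) : Decidable (Pre_get_characters_by_criterion list_of_tuples criteria value) := by unfold Pre_get_characters_by_criterion; infer_instance
def pvWitness_get_characters_by_criterion : (List (Option String × Option String × Option String × Option Int × Option String)) × Int × String :=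
  ([(some "Amber", some "Pyro", some "Bow", some 4, some "Mondstadt")], 1, "PYRO")

def Spec_get_characters_by_criterion (list_of_tuples : List (Option String × Option String × Option String × Option Int × Option String)) (criteria : Int) (value : String) (out : List (Option String × Option String × Option String × Option Int × Option String)) : Prop := out = get_characters_by_criterion_alt list_of_tuples criteria value
instance (list_of_tuples : List (Option String × Option String × Option String × Option Int × Option String)) (criteria : Int) (value : String) (out : List (Option String × Option String × Option String × Option Int × Option String)) : Decidable (Spec_get_characters_by_criterion list_of_tuples criteria value out) := by unfold Spec_get_characters_by_criterion; infer_instance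

-- ===== CLAIM (what is proved, stated in full; the proofs are below) =====
def Claim_equal_get_characters_by_criterion : Prop := ∀ (list_of_tuples : List (Option String × Option String × Option String × Option Int × Option String)) (criteria : Int) (value : String), Dom_get_characters_by_criterion list_of_tuples criteria value → Pre_get_characters_by_criterion list_of_tuples criteria value → Spec_get_characters_by_criterion list_of_tuples criteria value (get_characters_by_criterion list_of_tuples criteria value)

-- ===== LEMMAS AND PROOFS =====

-- a fold whose step appends the element exactly when p holds is a filter
theorem pv_fold_filter {a : Type} (step : List a → a → List a) (p : a → Bool)
    (h : ∀ acc t, step acc t = if p t then acc ++ [t] else acc) :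
    ∀ (l acc : List a), l.foldl step acc = acc ++ l.filter p := by
  intro l
  induction l with
  | nil => intro acc; simp
  | cons x xs ih =>
    intro acc
    rw [List.foldl_cons, h, List.filter_cons]
    by_cases hp : p x = true <;> simp [hp, ih]

theorem pvA_branch (value : String) (l : List (Option String × Option String × Option String × Option Int × Option String))
    (c : Int) (hc : c = 1 ∨ c = 2 ∨ c = 4) :
    get_characters_by_criterion l c value
      = l.filter (fun t =>
          match pvColumn c t with
          | some s => PySem.Str.lower s == PySem.Str.lower value
          | none => false) := by
  have hstep : ∀ (acc : List (Option String × Option String × Option String × Option Int × Option String)) t,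
      (fun (new_list : List (Option String × Option String × Option String × Option Int × Option String)) a_tuple =>
        let new_list := if c = 1 then
            match a_tuple.2.1 with
            | some s => if PySem.Str.lower s = PySem.Str.lower value then new_list ++ [a_tuple] else new_list
            | none => new_list
          else new_list
        let new_list := if c = 2 then
            match a_tuple.2.2.1 with
            | some s => if PySem.Str.lower s = PySem.Str.lower value then new_list ++ [a_tuple] else new_list
            | none => new_list
          else new_list
        let new_list := if c = 3 then
            match PySem.Int.ofStr? value with
            | some value_int =>
              match a_tuple.2.2.2.1 with
              | some r => if r = value_int then new_list ++ [a_tuple] else new_list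
              | none => new_list
            | none => new_list
          else new_list
        let new_list := if c = 4 then
            match a_tuple.2.2.2.2 with
            | some s => if PySem.Str.lower s = PySem.Str.lower value then new_list ++ [a_tuple] else new_list
            | none => new_list
          else new_list
        new_list) acc t
      = if (match pvColumn c t with
            | some s => PySem.Str.lower s == PySem.Str.lower value
            | none => false) then acc ++ [t] else acc := by
    intro acc t
    rcases hc with h | h | h <;> subst h <;>
      rcases t with ⟨x1, x2, x3, x4, x5⟩ <;>
      simp only [pvColumn] <;> norm_num
    · cases x2 <;> simp [beq_iff_eq]
    · cases x3 <;> simp [beq_iff_eq]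
    · cases x5 <;> simp [beq_iff_eq]
  exact (pv_fold_filter _ _ hstep l []).trans (List.nil_append _)

theorem pvA_rarity (value : String) (l : List (Option String × Option String × Option String × Option Int × Option String))
    (v : Int) (hv : PySem.Int.ofStr? value = some v) :
    get_characters_by_criterion l 3 value
      = l.filter (fun t =>
          match t.2.2.2.1 with
          | some r => r == v
          | none => false) := by
  have hstep : ∀ (acc : List (Option String × Option String × Option String × Option Int × Option String)) t,
      (fun (new_list : List (Option String × Option String × Option String × Option Int × Option String)) a_tuple =>
        let new_list := if (3 : Int) = 1 then
            match a_tuple.2.1 with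
            | some s => if PySem.Str.lower s = PySem.Str.lower value then new_list ++ [a_tuple] else new_list
            | none => new_list
          else new_list
        let new_list := if (3 : Int) = 2 then
            match a_tuple.2.2.1 with
            | some s => if PySem.Str.lower s = PySem.Str.lower value then new_list ++ [a_tuple] else new_list
            | none => new_list
          else new_list
        let new_list := if (3 : Int) = 3 then
            match PySem.Int.ofStr? value with
            | some value_int =>
              match a_tuple.2.2.2.1 with
              | some r => if r = value_int then new_list ++ [a_tuple] else new_list
              | none => new_list
            | none => new_list
          else new_list
        let new_list := if (3 : Int) = 4 then
            match a_tuple.2.2.2.2 with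
            | some s => if PySem.Str.lower s = PySem.Str.lower value then new_list ++ [a_tuple] else new_list
            | none => new_list
          else new_list
        new_list) acc t
      = if (match t.2.2.2.1 with
            | some r => r == v
            | none => false) then acc ++ [t] else acc := by
    intro acc t
    rcases t with ⟨x1, x2, x3, x4, x5⟩
    norm_num [hv]
    cases x4 <;> simp [beq_iff_eq]
  exact (pv_fold_filter _ _ hstep l []).trans (List.nil_append _)

theorem pvA_other (value : String) (l : List (Option String × Option String × Option String × Option Int × Option String))
    (c : Int) (h1 : c ≠ 1) (h2 : c ≠ 2) (h3 : c ≠ 3) (h4 : c ≠ 4) :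
    get_characters_by_criterion l c value = [] := by
  have hstep : ∀ (acc : List (Option String × Option String × Option String × Option Int × Option String)) t,
      (fun (new_list : List (Option String × Option String × Option String × Option Int × Option String)) a_tuple =>
        let new_list := if c = 1 then
            match a_tuple.2.1 with
            | some s => if PySem.Str.lower s = PySem.Str.lower value then new_list ++ [a_tuple] else new_list
            | none => new_list
          else new_list
        let new_list := if c = 2 then
            match a_tuple.2.2.1 with
            | some s => if PySem.Str.lower s = PySem.Str.lower value then new_list ++ [a_tuple] else new_list
            | none => new_list
          else new_list
        let new_list := if c = 3 then
            match PySem.Int.ofStr? value with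
            | some value_int =>
              match a_tuple.2.2.2.1 with
              | some r => if r = value_int then new_list ++ [a_tuple] else new_list
              | none => new_list
            | none => new_list
          else new_list
        let new_list := if c = 4 then
            match a_tuple.2.2.2.2 with
            | some s => if PySem.Str.lower s = PySem.Str.lower value then new_list ++ [a_tuple] else new_list
            | none => new_list
          else new_list
        new_list) acc t
      = if (fun _ => false) t then acc ++ [t] else acc := by
    intro acc t
    simp [h1, h2, h3, h4]
  exact (pv_fold_filter _ _ hstep l []).trans (by simp)

-- B side: the bucket of key k in the grouped index is exactly the filter of rows whose key is k
theorem pvB_bucket {K : Type} [BEq K] [LawfulBEq K]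
    (f : (Option String × Option String × Option String × Option Int × Option String) → Option K)
    (l : List (Option String × Option String × Option String × Option Int × Option String)) (k : K) :
    (pvGroup (l.filterMap (fun t => (f t).map (fun j => (j, t))))).getD k []
      = l.filter (fun t => f t == some k) := by
  unfold pvGroup
  rw [PySem.Dict.getD_foldl_modify_append]
  rw [PySem.Dict.getD_empty, List.nil_append]
  induction l with
  | nil => simp
  | cons x xs ih =>
    cases hfx : f x with
    | none => simp [hfx, ih]
    | some j =>
      by_cases hj : j = k <;>
        simp [hfx, hj, ih]

-- ===== VERDICT (by name: the statement is the Claim_ definition above) =====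
theorem get_characters_by_criterion_spec : Claim_equal_get_characters_by_criterion := by
  intro l c value _ hpre
  unfold Spec_get_characters_by_criterion
  rcases eq_or_ne l [] with hl | hl
  · subst hl
    simp [get_characters_by_criterion, get_characters_by_criterion_alt]
  by_cases h3 : c = 3
  · subst h3
    cases hv : PySem.Int.ofStr? value with
    | none => exact absurd ⟨rfl, hl, hv⟩ hpre
    | some v =>
      rw [pvA_rarity value l v hv]
      simp only [get_characters_by_criterion_alt, hv]
      rw [if_neg (by simp [hl])]
      simp only [if_true]
      rw [pvB_bucket (fun t => t.2.2.2.1) l v]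
      apply List.filter_congr
      intro t _
      cases t.2.2.2.1 <;> simp
  by_cases hstr : c = 1 ∨ c = 2 ∨ c = 4
  · rw [pvA_branch value l c hstr]
    have hc4 : c = 1 ∨ c = 2 ∨ c = 3 ∨ c = 4 := by tauto
    simp only [get_characters_by_criterion_alt]
    rw [if_neg (by simp [hc4, hl]), if_neg h3]
    have hfn : (fun t : Option String × Option String × Option String × Option Int × Option String =>
        ((pvColumn c t).map (fun s => (PySem.Str.lower s, t))))
        = (fun t => (((pvColumn c t).map PySem.Str.lower).map (fun j => (j, t)))) := by
      funext t; cases pvColumn c t <;> rfl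
    rw [hfn, pvB_bucket (fun t => (pvColumn c t).map PySem.Str.lower) l (PySem.Str.lower value)]
    apply List.filter_congr
    intro t _
    cases pvColumn c t <;> simp
  · rw [not_or, not_or] at hstr
    rw [pvA_other value l c hstr.1 hstr.2.1 h3 hstr.2.2]
    simp only [get_characters_by_criterion_alt]
    rw [if_pos (by tauto)]
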